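-- pv_equiv track=rewrite | github.com/kys-sheng/abc-rpv | rpv_misc.py | check_merge
-- ===== SOURCE A (Python) =====
-- def check_merge(insiglist,merge_choice):
--     """
--     Check if merge (group signatures via simplified object (J,3,L)) should be considered:
--     Conditions:
--     1: if in total, at least one of each of oblist is in the whole set
--     2: if simplified exist in every element
--     @TODO SF bracket treament
--
--     Inputs
--     ------
--     -insiglist    (array/list of str) : array/list of signatures in one-char syntax
--     -merge_choice               (str) : "J"/"3"/"L"
--
--     Output:bool
--     """
--     oblist = []
--     if merge_choice == "J":
--         oblist = ["j","t","b"]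
--     if merge_choice == "3":
--         oblist = ["t","b"]
--     if merge_choice == "L":
--         oblist = ["l","T"]
--     nobdat = []
--     for i in oblist:
--         nob = 0
--         for j in insiglist:
--             nob = nob + j.count(i)
--         nobdat.append(nob)
--
--     return all(x > 0 for x in nobdat) or all (x.count(merge_choice) > 0 for x in insiglist)
-- ===== SOURCE B (Python) =====
-- def check_merge(insiglist, merge_choice):
--     missing = set({"J": "jtb", "3": "tb", "L": "lT"}.get(merge_choice, ""))
--     everywhere = True
--     for sig in insiglist:
--         missing = missing - set(sig)
--         everywhere = everywhere and (merge_choice in sig)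
--     return not missing or everywhere
-- ===== Notes on version B (the rewrite author's own statement) =====
-- stated objective: alternative
-- what changed: Replaces A's staged per-target-char nested counting passes (for each required char, rescan every signature summing .count, then an all over the counts and a second all-pass for condition 2) with a single pass over insiglist that maintains two accumulators: a shrinking set of still-missing required chars (set difference per signature) and a running everywhere-flag; the result is 'missing emptied or flag still true'.
import Mathlib
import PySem

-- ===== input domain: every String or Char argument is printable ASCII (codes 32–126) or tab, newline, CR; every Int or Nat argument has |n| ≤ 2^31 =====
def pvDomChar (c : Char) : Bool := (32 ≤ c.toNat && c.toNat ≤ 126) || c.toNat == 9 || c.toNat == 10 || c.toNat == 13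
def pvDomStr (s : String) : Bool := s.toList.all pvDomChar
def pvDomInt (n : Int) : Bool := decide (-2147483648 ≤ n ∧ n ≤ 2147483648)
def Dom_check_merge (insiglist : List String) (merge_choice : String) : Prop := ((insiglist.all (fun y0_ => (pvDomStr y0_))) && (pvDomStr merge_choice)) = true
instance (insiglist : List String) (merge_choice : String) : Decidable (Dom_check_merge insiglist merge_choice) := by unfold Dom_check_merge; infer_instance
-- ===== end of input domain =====

-- B replaces A's staged per-target-char counting passes with ONE pass over insiglist keeping
-- two accumulators: a shrinking set of still-missing required chars and a running everywhere-flag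
-- (objective: alternative decomposition).

-- ===== PORT A =====
def check_merge (insiglist : List String) (merge_choice : String) : Bool :=
  let oblist : List String := []
  let oblist := if merge_choice == "J" then ["j", "t", "b"] else oblist
  let oblist := if merge_choice == "3" then ["t", "b"] else oblist
  let oblist := if merge_choice == "L" then ["l", "T"] else oblist
  let nobdat : List Int := oblist.foldl (fun nobdat i =>
    nobdat ++ [insiglist.foldl (fun nob j => nob + (PySem.Str.count j i : Int)) 0]) []
  nobdat.all (fun x => decide (0 < x)) ||
    insiglist.all (fun x => decide (0 < PySem.Str.count x merge_choice))

-- ===== PORT B =====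
def check_merge_alt (insiglist : List String) (merge_choice : String) : Bool :=
  let missing0 : PySem.Set Char := PySem.Set.ofList
    (((PySem.Dict.ofList [("J", "jtb"), ("3", "tb"), ("L", "lT")]).getD merge_choice "").toList)
  let res := insiglist.foldl
    (fun st sig => (PySem.Set.diff st.1 (PySem.Set.ofList sig.toList),
                    st.2 && PySem.Str.isIn merge_choice sig))
    (missing0, true)
  res.1.isEmpty || res.2

-- ===== PRECONDITION & SPEC =====
def Spec_check_merge (insiglist : List String) (merge_choice : String) (out : Bool) : Prop := out = check_merge_alt insiglist merge_choice
instance (insiglist : List String) (merge_choice : String) (out : Bool) : Decidable (Spec_check_merge insiglist merge_choice out) := by unfold Spec_check_merge; infer_instance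

-- ===== CLAIM (what is proved, stated in full; the proofs are below) =====
def Claim_equal_check_merge : Prop := ∀ (insiglist : List String) (merge_choice : String), Dom_check_merge insiglist merge_choice → Spec_check_merge insiglist merge_choice (check_merge insiglist merge_choice)

-- ===== LEMMAS AND PROOFS =====

-- acc is monotone through count.go
theorem le_count_go (sub : List Char) (fuel : Nat) (l : List Char) (acc : Nat) :
    acc ≤ PySem.Chars.count.go sub fuel l acc := by
  induction fuel generalizing l acc with
  | zero => simp [PySem.Chars.count.go]
  | succ fuel ih =>
      cases l with
      | nil => simp [PySem.Chars.count.go]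
      | cons h t =>
          rw [PySem.Chars.count.go]
          split
          · exact le_trans (Nat.le_succ acc) (ih _ _)
          · exact ih _ _

theorem count_go_pos_iff (sub : List Char) (hsub : sub ≠ []) (fuel : Nat) (l : List Char)
    (acc : Nat) (hl : l.length ≤ fuel) :
    (acc < PySem.Chars.count.go sub fuel l acc) ↔ sub <:+: l := by
  induction fuel generalizing l acc with
  | zero =>
      have : l = [] := List.eq_nil_of_length_eq_zero (Nat.le_zero.mp hl)
      subst this
      simp [PySem.Chars.count.go, List.infix_nil, hsub]
  | succ fuel ih =>
      cases l with
      | nil => simp [PySem.Chars.count.go, List.infix_nil, hsub]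
      | cons h t =>
          rw [PySem.Chars.count.go]
          by_cases hp : sub.isPrefixOf (h :: t) = true
          · simp only [hp, if_true]
            constructor
            · intro _
              exact (List.isPrefixOf_iff_prefix.mp hp).isInfix
            · intro _
              exact lt_of_lt_of_le (Nat.lt_succ_self acc) (le_count_go _ _ _ _)
          · rw [if_neg hp, List.infix_cons_iff]
            have hnp : ¬ sub <+: h :: t := fun hpre => hp (List.isPrefixOf_iff_prefix.mpr hpre)
            have ht : t.length ≤ fuel := by simpa using Nat.succ_le_succ_iff.mp hl
            rw [ih t acc ht]
            tauto

theorem count_pos_iff_infix (s sub : List Char) :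
    0 < PySem.Chars.count s sub ↔ sub <:+: s := by
  by_cases h : sub = []
  · subst h
    simp [PySem.Chars.count, List.nil_infix]
  · rw [PySem.Chars.count]
    simp only [List.isEmpty_iff, h, if_false]
    exact count_go_pos_iff sub h s.length s 0 le_rfl

theorem str_count_pos_iff_isIn (x mc : String) :
    (0 < PySem.Str.count x mc) ↔ PySem.Str.isIn mc x = true := by
  rw [PySem.Str.count_eq, PySem.Str.isIn_iff_infix]
  exact count_pos_iff_infix _ _

-- A's condition 2 (count > 0 per signature) is the membership test B's flag accumulates
theorem cond2_eq (L : List String) (mc : String) :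
    (L.all fun x => decide (0 < PySem.Str.count x mc)) = (L.all fun x => PySem.Str.isIn mc x) := by
  induction L with
  | nil => rfl
  | cons h t ih =>
      simp only [List.all_cons, ih]
      congr 1
      exact Bool.coe_iff_coe.mp (by rw [decide_eq_true_eq]; exact str_count_pos_iff_isIn h mc)

-- B's running flag is just 'all'
theorem flag_fold (L : List String) (mc : String) (b : Bool) :
    L.foldl (fun e sig => e && PySem.Str.isIn mc sig) b = (b && L.all fun x => PySem.Str.isIn mc x) := by
  induction L generalizing b with
  | nil => simp
  | cons h t ih => rw [List.foldl_cons, ih, List.all_cons, Bool.and_assoc]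

-- B's shrinking missing-set: folding set difference filters out each char present somewhere
theorem diff_fold (L : List String) (m : PySem.Set Char) :
    L.foldl (fun s sig => PySem.Set.diff s (PySem.Set.ofList sig.toList)) m
      = m.filter (fun c => !(L.any fun sig => sig.toList.contains c)) := by
  induction L generalizing m with
  | nil => simp
  | cons h t ih =>
      rw [List.foldl_cons, ih, PySem.Set.diff, List.filter_filter]
      apply List.filter_congr
      intro c _
      simp [PySem.Set.mem_ofList, List.any_cons, Bool.not_or, Bool.and_comm]

-- A's summed count over all signatures for the one-char target c is positive
-- iff some signature contains c
theorem cond1_char (c : Char) (L : List String) :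
    decide (0 < L.foldl (fun nob j => nob + (PySem.Str.count j (String.singleton c) : Int)) 0)
      = (L.any fun sig => sig.toList.contains c) := by
  have hiff : (0 < L.foldl (fun nob j => nob + (PySem.Str.count j (String.singleton c) : Int)) 0)
      ↔ ∃ s ∈ L, c ∈ s.toList := by
    rw [PySem.List.foldl_add, zero_add]
    rw [show (L.map fun j => (PySem.Str.count j (String.singleton c) : Int)).sum
          = ((L.map fun j => PySem.Str.count j (String.singleton c)).sum : Int) by
      rw [Nat.cast_list_sum, List.map_map]; rfl]
    rw [Int.natCast_pos, Nat.pos_iff_ne_zero, ne_eq, List.sum_eq_zero_iff]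
    push Not
    constructor
    · rintro ⟨x, hx, hpos⟩
      obtain ⟨s, hs, rfl⟩ := List.mem_map.mp hx
      refine ⟨s, hs, ?_⟩
      have := (str_count_pos_iff_isIn s (String.singleton c)).mp (Nat.pos_of_ne_zero hpos)
      rw [PySem.Str.isIn_iff_infix] at this
      simpa using (List.singleton_infix_iff _ _).mp (by simpa using this)
    · rintro ⟨s, hs, hc⟩
      refine ⟨PySem.Str.count s (String.singleton c), List.mem_map.mpr ⟨s, hs, rfl⟩, ?_⟩
      have : 0 < PySem.Str.count s (String.singleton c) := by
        rw [str_count_pos_iff_isIn, PySem.Str.isIn_iff_infix]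
        simpa using (List.singleton_infix_iff _ _).mpr hc
      omega
  rw [Bool.eq_iff_iff, decide_eq_true_eq, hiff]
  simp

-- A's all-counts-positive over targets obs equals B's missing-set becoming empty
theorem cond1_all (L : List String) (obs : List Char) :
    (((obs.map String.singleton).foldl
        (fun nobdat i => nobdat ++ [L.foldl (fun nob j => nob + (PySem.Str.count j i : Int)) 0])
        []).all (fun x => decide (0 < x)))
      = (((PySem.Set.ofList obs).filter
            (fun c => !(L.any fun sig => sig.toList.contains c))).isEmpty) := by
  rw [PySem.List.foldl_append_singleton_eq_map, List.nil_append, List.map_map, List.all_map]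
  have hleft : ∀ obs' : List Char,
      (obs'.all ((fun x => decide (0 < x)) ∘
          (fun i => L.foldl (fun nob j => nob + (PySem.Str.count j i : Int)) 0) ∘
          String.singleton))
        = obs'.all (fun c => L.any fun sig => sig.toList.contains c) := by
    intro obs'
    induction obs' with
    | nil => rfl
    | cons c t ih =>
        simp only [List.all_cons, ih, Function.comp_apply]
        congr 1
        exact cond1_char c L
  rw [hleft]
  rw [Bool.eq_iff_iff, List.all_eq_true]
  rw [show ((PySem.Set.ofList obs).filter
        (fun c => !(L.any fun sig => sig.toList.contains c))).isEmpty
      = decide (∀ c ∈ PySem.Set.ofList obs, (L.any fun sig => sig.toList.contains c) = true) by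
    rw [Bool.eq_iff_iff, List.isEmpty_iff, List.filter_eq_nil_iff, decide_eq_true_eq]
    constructor
    · intro h c hc
      simpa using h c hc
    · intro h c hc
      simpa using h c hc]
  rw [decide_eq_true_eq]
  constructor
  · intro h c hc
    exact h c ((PySem.Set.mem_ofList obs c).mp hc)
  · intro h c hc
    exact h c ((PySem.Set.mem_ofList obs c).mpr hc)

-- ===== VERDICT (by name: the statement is the Claim_ definition above) =====
theorem check_merge_spec : Claim_equal_check_merge := by
  intro insiglist merge_choice _
  unfold Spec_check_merge check_merge check_merge_alt
  dsimp only
  rw [cond2_eq]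
  rw [PySem.List.foldl_prod_mk
    (f := fun s sig => PySem.Set.diff s (PySem.Set.ofList sig.toList))
    (g := fun e sig => e && PySem.Str.isIn merge_choice sig)]
  rw [flag_fold, Bool.true_and, diff_fold]
  by_cases hJ : merge_choice = "J"
  · subst hJ
    exact congrArg (fun b => b || insiglist.all fun x => PySem.Str.isIn "J" x)
      (cond1_all insiglist ['j', 't', 'b'])
  · by_cases h3 : merge_choice = "3"
    · subst h3
      exact congrArg (fun b => b || insiglist.all fun x => PySem.Str.isIn "3" x)
        (cond1_all insiglist ['t', 'b'])
    · by_cases hL : merge_choice = "L"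
      · subst hL
        exact congrArg (fun b => b || insiglist.all fun x => PySem.Str.isIn "L" x)
          (cond1_all insiglist ['l', 'T'])
      · have e1 : (merge_choice == "J") = false := by simp [hJ]
        have e2 : (merge_choice == "3") = false := by simp [h3]
        have e3 : (merge_choice == "L") = false := by simp [hL]
        have hD : (PySem.Dict.ofList [(("J" : String), ("jtb" : String)), ("3", "tb"),
            ("L", "lT")]).getD merge_choice "" = "" :=
          PySem.Dict.getD_of_not_contains _ _ (by
            rw [PySem.Dict.contains_eq_decide_mem_keys,
              show (PySem.Dict.ofList [(("J" : String), ("jtb" : String)), ("3", "tb"),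
                ("L", "lT")]).keys = ["J", "3", "L"] from rfl]
            simp [hJ, h3, hL])
        simp only [e1, e2, e3, Bool.false_eq_true, if_false, hD]
        rfl
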